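-- pv_equiv track=rewrite | github.com/AlexWUrobot/leetcode_python | Group Students.py | group_students
-- ===== SOURCE A (Python) =====
-- def group_students(levels, max_spread):
--     # Sort the levels in ascending order
--     levels.sort()
--
--     # Initialize the number of classes and the current level
--     classes = 1
--     cur_level = levels[0]
--
--     # Iterate through each level
--     for level in levels:
--         # Check if the difference between the current level and cur_level exceeds max_spread
--         if (level - cur_level) > max_spread:
--             # Increment the number of classes and update cur_level
--             classes += 1
--             cur_level = level
--
--     # Return the total number of classes
--     return classes
-- ===== SOURCE B (Python) =====
-- # Binary-search group boundaries on the sorted list instead of scanning every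
-- # element (A imports nothing, so the binary search is written out by hand
-- # rather than via the bisect module). Like A, sorts `levels` in place and
-- # raises IndexError on an empty list.
--
-- def _bisect_right(a, x, lo, hi):
--     # index of the first element of a[lo:hi] greater than x (a sorted)
--     while lo < hi:
--         mid = (lo + hi) // 2
--         if x < a[mid]:
--             hi = mid
--         else:
--             lo = mid + 1
--     return lo
--
--
-- def group_students(levels, max_spread):
--     levels.sort()
--     n = len(levels)
--     classes = 1
--     i = _bisect_right(levels, levels[0] + max_spread, 0, n)
--     while i < n:
--         classes += 1
--         i = _bisect_right(levels, levels[i] + max_spread, i + 1, n)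
--     return classes
-- ===== Notes on version B (the rewrite author's own statement) =====
-- stated objective: alternative
-- what changed: Instead of A's linear scan over every element of the sorted list, B binary-searches (hand-written bisect_right) each group's right boundary and jumps straight to the next group's start, doing O(g log n) work after the sort instead of O(n).
import Mathlib
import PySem

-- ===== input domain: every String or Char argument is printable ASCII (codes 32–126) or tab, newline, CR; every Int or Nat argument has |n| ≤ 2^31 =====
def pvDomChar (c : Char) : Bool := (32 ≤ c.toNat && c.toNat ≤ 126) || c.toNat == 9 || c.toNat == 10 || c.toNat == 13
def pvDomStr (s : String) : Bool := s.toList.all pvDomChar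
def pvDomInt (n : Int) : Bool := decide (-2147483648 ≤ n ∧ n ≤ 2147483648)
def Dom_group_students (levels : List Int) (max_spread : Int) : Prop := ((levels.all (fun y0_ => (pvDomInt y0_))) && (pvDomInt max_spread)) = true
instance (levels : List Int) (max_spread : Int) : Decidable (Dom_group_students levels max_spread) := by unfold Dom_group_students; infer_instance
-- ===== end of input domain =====

-- B replaces A's element-by-element scan of the sorted list by binary-searched
-- jumps to each group's boundary (objective: alternative). Both A and B sort
-- `levels` in place in Python (the equivalence proved here is about the return
-- value) and both raise IndexError on an empty list (excluded by Pre_).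

-- ===== PORT A =====
def group_students (levels : List Int) (max_spread : Int) : Int :=
  let s := PySem.List.sorted levels (fun x => x) false
  match PySem.List.pyGet? s 0 with
  | none => 0   -- Python raises IndexError here (empty list); excluded by Pre_
  | some c0 =>
    (s.foldl (fun p lv => if lv - p.2 > max_spread then (p.1 + 1, lv) else p)
      ((1 : Int), c0)).1

-- ===== PORT B =====
-- hand-written bisect_right from Source B (`while lo < hi: mid = (lo+hi)//2; …`);
-- the `while` is fuel recursion, fuel (hi-lo).toNat bounds the iteration count
def bisectRightGo (a : List Int) (x : Int) : Nat → Int → Int → Int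
  | 0, lo, _hi => lo
  | fuel + 1, lo, hi =>
    if lo < hi then
      let mid := PySem.Int.floordiv (lo + hi) 2
      match PySem.List.pyGet? a mid with
      | some v => if x < v then bisectRightGo a x fuel lo mid else bisectRightGo a x fuel (mid + 1) hi
      | none => lo   -- a[mid] IndexError; unreachable for 0 ≤ lo, hi ≤ len a
    else lo

def bisectRightB (a : List Int) (x : Int) (lo hi : Int) : Int :=
  bisectRightGo a x (hi - lo).toNat lo hi

-- the `while i < n` loop of Source B; fuel n.toNat bounds the iteration count
-- (each pass moves i right by at least one)
def loopGo (a : List Int) (ms : Int) : Nat → Int → Int → Int → Int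
  | 0, classes, _i, _n => classes
  | fuel + 1, classes, i, n =>
    if i < n then
      match PySem.List.pyGet? a i with
      | some v => loopGo a ms fuel (classes + 1) (bisectRightB a (v + ms) (i + 1) n) n
      | none => classes   -- a[i] IndexError; unreachable (0 ≤ i < n = len a)
    else classes

def group_students_alt (levels : List Int) (max_spread : Int) : Int :=
  let s := PySem.List.sorted levels (fun x => x) false
  let n : Int := PySem.List.len s
  match PySem.List.pyGet? s 0 with
  | none => 0   -- Python raises IndexError here (empty list); excluded by Pre_
  | some v0 => loopGo s max_spread s.length 1 (bisectRightB s (v0 + max_spread) 0 n) n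

-- ===== PRECONDITION & SPEC =====
-- Both A and B read levels[0]: an empty list raises IndexError in both.
def Pre_group_students (levels : List Int) (max_spread : Int) : Prop := levels ≠ []
instance (levels : List Int) (max_spread : Int) : Decidable (Pre_group_students levels max_spread) := by unfold Pre_group_students; infer_instance
def pvWitness_group_students : List Int × Int := ([3, 1, 9, 4], 2)

def Spec_group_students (levels : List Int) (max_spread : Int) (out : Int) : Prop := out = group_students_alt levels max_spread
instance (levels : List Int) (max_spread : Int) (out : Int) : Decidable (Spec_group_students levels max_spread out) := by unfold Spec_group_students; infer_instance

-- ===== CLAIM (what is proved, stated in full; the proofs are below) =====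
def Claim_equal_group_students : Prop := ∀ (levels : List Int) (max_spread : Int), Dom_group_students levels max_spread → Pre_group_students levels max_spread → Spec_group_students levels max_spread (group_students levels max_spread)

-- ===== LEMMAS AND PROOFS =====

-- binary-search correctness on a sorted list:
-- the result j satisfies lo ≤ j ≤ hi, a[k] ≤ x for k ∈ [lo, j), x < a[k] for k ∈ [j, hi)
lemma bisectRightGo_spec (a : List Int) (hs : a.Pairwise (· ≤ ·)) (x : Int) :
    ∀ (m : Nat) (lo hi : Int), 0 ≤ lo → lo ≤ hi → hi ≤ a.length → (hi - lo).toNat ≤ m →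
      lo ≤ bisectRightGo a x m lo hi ∧ bisectRightGo a x m lo hi ≤ hi ∧
      (∀ k : Nat, (hk : k < a.length) → lo ≤ (k : Int) → (k : Int) < bisectRightGo a x m lo hi → a[k] ≤ x) ∧
      (∀ k : Nat, (hk : k < a.length) → bisectRightGo a x m lo hi ≤ (k : Int) → (k : Int) < hi → x < a[k]) := by
  intro m
  induction m with
  | zero =>
    intro lo hi h0 hlh hhi hm
    have : lo = hi := by omega
    subst this
    simp only [bisectRightGo]
    refine ⟨le_rfl, le_rfl, ?_, ?_⟩ <;> intro k hk h1 h2 <;> omega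
  | succ m ih =>
    intro lo hi h0 hlh hhi hm
    rcases eq_or_lt_of_le hlh with heq | hlt
    · subst heq
      simp only [bisectRightGo, if_neg (lt_irrefl lo)]
      refine ⟨le_rfl, le_rfl, ?_, ?_⟩ <;> intro k hk h1 h2 <;> omega
    · have h1 := PySem.Int.le_floordiv_iff_mul_le (a := lo + hi) (b := 2) (q := lo) (by omega)
      have h2 := PySem.Int.floordiv_lt_iff_lt_mul (a := lo + hi) (b := 2) (q := hi) (by omega)
      set mid := PySem.Int.floordiv (lo + hi) 2 with hmid
      have hmlo : lo ≤ mid := by omega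
      have hmhi : mid < hi := by omega
      have hmn : mid < (a.length : Int) := by omega
      have hget : PySem.List.pyGet? a mid = some (a[mid.toNat]'(by omega)) :=
        PySem.List.pyGet?_eq_some_getElem a (i := mid) (by omega) (by simpa using hmn)
      have hmono : ∀ (p q : Nat), (hq : q < a.length) → (hpq : p ≤ q) → a[p]'(by omega) ≤ a[q] := by
        intro p q hq hpq
        rcases eq_or_lt_of_le hpq with rfl | hlt'
        · exact le_rfl
        · exact (List.pairwise_iff_getElem.mp hs) p q (by omega) hq hlt'
      simp only [bisectRightGo, if_pos hlt, ← hmid, hget]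
      by_cases hx : x < a[mid.toNat]'(by omega)
      · rw [if_pos hx]
        obtain ⟨r1, r2, r3, r4⟩ := ih lo mid h0 hmlo (by omega) (by omega)
        refine ⟨r1, by omega, r3, ?_⟩
        intro k hk hge hklt
        by_cases hkm : (k : Int) < mid
        · exact r4 k hk hge hkm
        · calc x < a[mid.toNat]'(by omega) := hx
            _ ≤ a[k] := hmono mid.toNat k hk (by omega)
      · rw [if_neg hx]
        rw [not_lt] at hx
        obtain ⟨r1, r2, r3, r4⟩ := ih (mid + 1) hi (by omega) (by omega) hhi (by omega)
        refine ⟨by omega, r2, ?_, r4⟩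
        intro k hk hge hklt
        by_cases hkm : (k : Int) ≤ mid
        · calc a[k] ≤ a[mid.toNat]'(by omega) := hmono k mid.toNat (by omega) (by omega)
            _ ≤ x := hx
        · exact r3 k hk (by omega) hklt

lemma bisectRightB_spec (a : List Int) (hs : a.Pairwise (· ≤ ·)) (x lo hi : Int)
    (h0 : 0 ≤ lo) (hlh : lo ≤ hi) (hhi : hi ≤ a.length) :
    lo ≤ bisectRightB a x lo hi ∧ bisectRightB a x lo hi ≤ hi ∧
    (∀ k : Nat, (hk : k < a.length) → lo ≤ (k : Int) → (k : Int) < bisectRightB a x lo hi → a[k] ≤ x) ∧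
    (∀ k : Nat, (hk : k < a.length) → bisectRightB a x lo hi ≤ (k : Int) → (k : Int) < hi → x < a[k]) :=
  bisectRightGo_spec a hs x (hi - lo).toNat lo hi h0 hlh hhi le_rfl

-- a fold segment whose elements all stay within the spread leaves A's state unchanged
lemma foldl_step_const (ms c cls : Int) (t : List Int) (h : ∀ y ∈ t, y ≤ c + ms) :
    t.foldl (fun p lv => if lv - p.2 > ms then (p.1 + 1, lv) else p) (cls, c) = (cls, c) := by
  induction t with
  | nil => rfl
  | cons y t iht =>
    have hy : ¬ (y - c > ms) := by have := h y (by simp); omega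
    simp only [List.foldl_cons, if_neg hy]
    exact iht (fun z hz => h z (by simp [hz]))

-- main loop invariant: B's jump loop from index i with current level c computes
-- exactly what A's fold computes over the suffix a.drop i with state (cls, c)
lemma loopGo_eq_foldl (a : List Int) (ms : Int) (hs : a.Pairwise (· ≤ ·)) :
    ∀ (fuel : Nat) (i cls c : Int), 0 ≤ i → i ≤ a.length → ((a.length : Int) - i).toNat ≤ fuel →
      loopGo a ms fuel cls (bisectRightB a (c + ms) i (a.length : Int)) (a.length : Int)
        = ((a.drop i.toNat).foldl (fun p lv => if lv - p.2 > ms then (p.1 + 1, lv) else p) (cls, c)).1 := by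
  intro fuel
  induction fuel with
  | zero =>
    intro i cls c h0 hle hm
    have hi : i = (a.length : Int) := by omega
    subst hi
    obtain ⟨r1, r2, r3, r4⟩ := bisectRightB_spec a hs (c + ms) (a.length : Int) (a.length : Int) (by omega) le_rfl le_rfl
    simp only [loopGo]
    have : a.drop ((a.length : Int)).toNat = [] := List.drop_eq_nil_of_le (by omega)
    simp [this]
  | succ fuel ih =>
    intro i cls c h0 hle hm
    obtain ⟨r1, r2, r3, r4⟩ := bisectRightB_spec a hs (c + ms) i (a.length : Int) h0 hle le_rfl
    set j := bisectRightB a (c + ms) i (a.length : Int) with hjdef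
    have hj0 : 0 ≤ j := by omega
    -- the skipped segment [i, j) leaves A's state unchanged
    have hsplit : a.drop i.toNat = (a.drop i.toNat).take (j.toNat - i.toNat) ++ a.drop j.toNat := by
      conv_lhs => rw [← List.take_append_drop (j.toNat - i.toNat) (a.drop i.toNat)]
      rw [List.drop_drop]
      have hidx : i.toNat + (j.toNat - i.toNat) = j.toNat := by omega
      rw [hidx]
    have hseg : ∀ y ∈ (a.drop i.toNat).take (j.toNat - i.toNat), y ≤ c + ms := by
      intro y hy
      obtain ⟨p, hp, hpy⟩ := List.mem_iff_getElem.mp hy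
      have hplen : p < j.toNat - i.toNat := by
        have := hp
        simp [List.length_take, List.length_drop] at this
        omega
      have hpd : p < (a.drop i.toNat).length := by
        simp [List.length_drop]
        have := hp; simp [List.length_take, List.length_drop] at this; omega
      have : y = a[i.toNat + p]'(by simp [List.length_drop] at hpd; omega) := by
        rw [← hpy]
        rw [List.getElem_take, List.getElem_drop]
      rw [this]
      exact r3 (i.toNat + p) (by simp [List.length_drop] at hpd; omega) (by omega) (by omega)
    have hfold : (a.drop i.toNat).foldl (fun p lv => if lv - p.2 > ms then (p.1 + 1, lv) else p) (cls, c)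
        = (a.drop j.toNat).foldl (fun p lv => if lv - p.2 > ms then (p.1 + 1, lv) else p) (cls, c) := by
      rw [hsplit, List.foldl_append, foldl_step_const ms c cls _ hseg]
    rw [hfold]
    by_cases hjn : j < (a.length : Int)
    · have hjlen : j.toNat < a.length := by omega
      have hget : PySem.List.pyGet? a j = some a[j.toNat] :=
        PySem.List.pyGet?_eq_some_getElem a (i := j) hj0 (by simpa using hjn)
      have hgt : c + ms < a[j.toNat] := r4 j.toNat hjlen (by omega) (by omega)
      simp only [loopGo, if_pos hjn, hget]
      have hdrop : a.drop j.toNat = a[j.toNat] :: a.drop (j.toNat + 1) :=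
        (List.drop_eq_getElem_cons hjlen)
      rw [hdrop]
      simp only [List.foldl_cons, if_pos (show a[j.toNat] - c > ms by omega)]
      have := ih (j + 1) (cls + 1) (a[j.toNat]) (by omega) (by omega) (by omega)
      have hjt : (j + 1).toNat = j.toNat + 1 := by omega
      rw [hjt] at this
      exact this
    · have hj : j = (a.length : Int) := by omega
      simp only [loopGo, if_neg (show ¬ j < (a.length : Int) by omega)]
      have : a.drop j.toNat = [] := List.drop_eq_nil_of_le (by omega)
      simp [this]

-- ===== VERDICT (by name: the statement is the Claim_ definition above) =====
theorem group_students_spec : Claim_equal_group_students := by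
  intro levels max_spread _hdom hpre
  unfold Spec_group_students group_students group_students_alt
  set s := PySem.List.sorted levels (fun x => x) false with hsdef
  have hs : s.Pairwise (· ≤ ·) := PySem.List.sorted_pairwise levels (fun x => x)
  have hne : s ≠ [] := by
    intro h
    exact hpre ((PySem.List.sorted_eq_nil_iff levels (fun x => x) false).mp (hsdef ▸ h))
  have hlen : 0 < s.length := List.length_pos_iff.mpr hne
  have hget : PySem.List.pyGet? s 0 = some (s[0]'hlen) :=
    PySem.List.pyGet?_eq_some_getElem s (i := 0) le_rfl (by exact_mod_cast hlen)
  simp only [hget, PySem.List.len_eq]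
  have := loopGo_eq_foldl s max_spread hs s.length 0 1 (s[0]'hlen) le_rfl (by omega) (by omega)
  simp only [Int.toNat_zero, List.drop_zero] at this
  exact this.symm
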